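-- pv_equiv track=rewrite | github.com/hotteok00/Algorithm | 프로그래머스/2/148652. 유사 칸토어 비트열/유사 칸토어 비트열.py | position_right
-- ===== SOURCE A (Python) =====
-- def position_right(n, r):
--     if n == 1: return count_1('11011'[:r])
--
--     r_where = find_where(n, r)
--
--     case = case_distinction(-1, r_where)
--
--     count = r_where - (-1)
--     r_adjust = r_where * (5 ** (n-1))
--
--     if case == 2:
--         return 2 * (4 ** (n-1))
--     elif case == 4:
--         return (count-1) * (4 ** (n-1)) + position_right(n-1, r-r_adjust)
--     else:
--         return (count-2) * (4 ** (n-1)) + position_right(n-1, r-r_adjust)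
--
-- def find_where(n, target):
--     for i in range(5):
--         if i * (5 ** (n-1)) < target <= (i + 1) * (5 ** (n-1)):
--             return i
--
-- def case_distinction(l, r):
--     if l == 2 or r == 2:
--         if l == 2 and r == 2:
--             return 0
--         else:
--             if l == 2 and r != 2:
--                 return 1
--             else:
--                 return 2
--     else:
--         if l == r:
--             return 3
--         else:
--             if (l < 2 and r < 2) or (l > 2 and r > 2):
--                 return 4
--             else:
--                 return 5
--
-- def count_1(arr):
--     return arr.count('1')
-- ===== SOURCE B (Python) =====
-- def position_right(n, r):
--     # Iterative descent through the levels, keeping a running total,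
--     # instead of A's recursive find_where/case_distinction machinery.
--     total = 0
--     level = n
--     while level > 1:
--         p = 5 ** (level - 1)
--         d = (r - 1) // p          # base-5 digit of the position at this level
--         if d == 2:                # the all-zero middle block: nothing more to count
--             return total + 2 * 4 ** (level - 1)
--         total += (d if d < 2 else d - 1) * 4 ** (level - 1)
--         r -= d * p
--         level -= 1
--     return total + '11011'[:r].count('1')
-- ===== Notes on version B (the rewrite author's own statement) =====
-- stated objective: simpler
-- what changed: Replaces A's recursion through find_where (a linear scan over range(5)) and the case_distinction helper by a single iterative loop that computes the base-5 digit directly with (r-1)//p and maintains a running total.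
-- outside the precondition, e.g. on position_right(0, 1): A returns 0.9999999999999929, B returns 1; on position_right(2, 30): A raises TypeError, B returns 20
import Mathlib
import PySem

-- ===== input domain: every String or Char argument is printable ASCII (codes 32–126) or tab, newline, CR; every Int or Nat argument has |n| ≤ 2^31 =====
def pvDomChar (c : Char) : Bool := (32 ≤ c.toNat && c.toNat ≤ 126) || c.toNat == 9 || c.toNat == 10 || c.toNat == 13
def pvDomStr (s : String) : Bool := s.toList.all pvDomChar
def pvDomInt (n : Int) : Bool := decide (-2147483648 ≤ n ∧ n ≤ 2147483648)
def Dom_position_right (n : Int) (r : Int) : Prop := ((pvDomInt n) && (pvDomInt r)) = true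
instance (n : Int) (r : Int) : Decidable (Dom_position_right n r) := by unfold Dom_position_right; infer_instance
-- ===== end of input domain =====

-- B replaces A's recursive find_where/case_distinction machinery by one iterative loop
-- that computes the base-5 digit directly with (r-1)//p and keeps a running total (objective: simpler).

-- ===== PORT A =====

-- Python's `b ** e`; exact for e ≥ 0 (for e < 0 Python produces a float, outside Pre_).
def pyPow (b : Int) (e : Int) : Int := b ^ e.toNat

-- `for i in range(5): if i*(5**(n-1)) < target <= (i+1)*(5**(n-1)): return i`  (first hit, else None)
def find_where (n : Int) (target : Int) : Option Int :=
  (PySem.List.pyRange 0 5 1).find?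
    (fun i => decide (i * pyPow 5 (n-1) < target ∧ target ≤ (i + 1) * pyPow 5 (n-1)))

def case_distinction (l : Int) (r : Int) : Int :=
  if l = 2 ∨ r = 2 then
    if l = 2 ∧ r = 2 then 0
    else if l = 2 ∧ r ≠ 2 then 1
    else 2
  else if l = r then 3
  else if (l < 2 ∧ r < 2) ∨ (l > 2 ∧ r > 2) then 4
  else 5

def count_1 (arr : String) : Int := (PySem.Str.count arr "1" : Int)

def position_right (n : Int) (r : Int) : Int :=
  if n = 1 then count_1 (PySem.Str.slice "11011" none (some r))
  else if n ≤ 1 then 0  -- totality guard: for n ≤ 0 Python computes with floats / raises (outside Pre_)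
  else
    match find_where n r with
    | none => 0  -- Python: case_distinction(-1, None) raises TypeError here (outside Pre_)
    | some r_where =>
      let case := case_distinction (-1) r_where
      let count := r_where - (-1)
      let r_adjust := r_where * pyPow 5 (n-1)
      if case = 2 then 2 * pyPow 4 (n-1)
      else if case = 4 then (count - 1) * pyPow 4 (n-1) + position_right (n-1) (r - r_adjust)
      else (count - 2) * pyPow 4 (n-1) + position_right (n-1) (r - r_adjust)
termination_by n.toNat
decreasing_by all_goals (simp; omega)

-- ===== PORT B =====

-- the `while level > 1` loop of Source B, state (level, r, total)
def altLoop (level : Int) (r : Int) (total : Int) : Int :=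
  if level ≤ 1 then total + (PySem.Str.count (PySem.Str.slice "11011" none (some r)) "1" : Int)
  else
    let p := (5:Int) ^ (level - 1).toNat
    let d := PySem.Int.floordiv (r - 1) p
    if d = 2 then total + 2 * (4:Int) ^ (level - 1).toNat
    else altLoop (level - 1) (r - d * p)
           (total + (if d < 2 then d else d - 1) * (4:Int) ^ (level - 1).toNat)
termination_by level.toNat
decreasing_by all_goals (simp; omega)

def position_right_alt (n : Int) (r : Int) : Int := altLoop n r 0

-- ===== PRECONDITION & SPEC =====
-- Pre_ excludes exactly the inputs on which A does not return an int: for n ≤ 0, or for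
-- n ≥ 2 with r outside (0, 5^n], find_where returns None and case_distinction raises
-- TypeError (except n = 0, r = 1, where float arithmetic makes A return a float).
def Pre_position_right (n : Int) (r : Int) : Prop :=
  n = 1 ∨ (2 ≤ n ∧ 1 ≤ r ∧ r ≤ (5:Int) ^ n.toNat)
instance (n : Int) (r : Int) : Decidable (Pre_position_right n r) := by
  unfold Pre_position_right; infer_instance

def pvWitness_position_right : Int × Int := (2, 7)

def Spec_position_right (n : Int) (r : Int) (out : Int) : Prop := out = position_right_alt n r
instance (n : Int) (r : Int) (out : Int) : Decidable (Spec_position_right n r out) := by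
  unfold Spec_position_right; infer_instance

-- ===== CLAIM (what is proved, stated in full; the proofs are below) =====
def Claim_equal_position_right : Prop :=
  ∀ (n : Int) (r : Int), Dom_position_right n r → Pre_position_right n r →
    Spec_position_right n r (position_right n r)

-- ===== LEMMAS AND PROOFS =====

lemma digit_bounds (p r : Int) (hp : 0 < p) (h1 : 1 ≤ r) (h5 : r ≤ 5 * p) :
    PySem.Int.floordiv (r - 1) p * p ≤ r - 1 ∧
    r - 1 < (PySem.Int.floordiv (r - 1) p + 1) * p ∧
    0 ≤ PySem.Int.floordiv (r - 1) p ∧ PySem.Int.floordiv (r - 1) p ≤ 4 := by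
  obtain ⟨hlo, hhi⟩ := (PySem.Int.floordiv_eq_iff_of_pos hp).mp
    (rfl : PySem.Int.floordiv (r - 1) p = PySem.Int.floordiv (r - 1) p)
  refine ⟨hlo, hhi, ?_, ?_⟩
  · by_contra h
    simp only [not_le] at h
    have : (PySem.Int.floordiv (r - 1) p + 1) * p ≤ 0 :=
      mul_nonpos_of_nonpos_of_nonneg (by omega) (le_of_lt hp)
    omega
  · by_contra h
    simp only [not_le] at h
    have : 5 * p ≤ PySem.Int.floordiv (r - 1) p * p :=
      mul_le_mul_of_nonneg_right (by omega) (le_of_lt hp)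
    omega

lemma find_where_eq (n r : Int) (_h2 : 2 ≤ n) (h1 : 1 ≤ r)
    (h5 : r ≤ 5 * (5:Int) ^ (n - 1).toNat) :
    find_where n r = some (PySem.Int.floordiv (r - 1) ((5:Int) ^ (n - 1).toNat)) := by
  set p : Int := (5:Int) ^ (n - 1).toNat with hpdef
  have hp : 0 < p := by positivity
  obtain ⟨hlo, hhi, h0, h4⟩ := digit_bounds p r hp h1 h5
  set d : Int := PySem.Int.floordiv (r - 1) p with hddef
  have hP : pyPow 5 (n - 1) = p := rfl
  unfold find_where
  rw [(by decide : PySem.List.pyRange 0 5 1 = [0, 1, 2, 3, 4])]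
  simp only [List.find?, hP]
  have hd5 : d = 0 ∨ d = 1 ∨ d = 2 ∨ d = 3 ∨ d = 4 := by omega
  rcases hd5 with h | h | h | h | h <;> rw [h] <;> rw [h] at hlo hhi
  · norm_num [show (0:Int) < r by omega, show r ≤ p by omega]
  · norm_num [show (0:Int) < r by omega, show ¬ r ≤ p by omega,
      show p < r by omega, show r ≤ 2 * p by omega]
  · norm_num [show (0:Int) < r by omega, show ¬ r ≤ p by omega,
      show p < r by omega, show ¬ r ≤ 2 * p by omega,
      show 2 * p < r by omega, show r ≤ 3 * p by omega]
  · norm_num [show (0:Int) < r by omega, show ¬ r ≤ p by omega,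
      show p < r by omega, show ¬ r ≤ 2 * p by omega,
      show 2 * p < r by omega, show ¬ r ≤ 3 * p by omega,
      show 3 * p < r by omega, show r ≤ 4 * p by omega]
  · norm_num [show (0:Int) < r by omega, show ¬ r ≤ p by omega,
      show p < r by omega, show ¬ r ≤ 2 * p by omega,
      show 2 * p < r by omega, show ¬ r ≤ 3 * p by omega,
      show 3 * p < r by omega, show ¬ r ≤ 4 * p by omega,
      show 4 * p < r by omega, show r ≤ 5 * p by omega]

lemma altLoop_eq (k : Nat) : ∀ (n r total : Int), n.toNat ≤ k →
    Pre_position_right n r → altLoop n r total = total + position_right n r := by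
  induction k with
  | zero =>
    intro n r total hk hpre
    unfold Pre_position_right at hpre
    omega
  | succ k ih =>
    intro n r total hk hpre
    rcases hpre with h1 | ⟨h2, hr1, hr5⟩
    · subst h1
      rw [altLoop, position_right]
      simp [count_1]
    · set p : Int := (5:Int) ^ (n - 1).toNat with hpdef
      have hp : 0 < p := by positivity
      have hps : (5:Int) ^ n.toNat = 5 * p := by
        have hn : n.toNat = (n - 1).toNat + 1 := by omega
        rw [hpdef, hn, pow_succ]; ring
      have hr5' : r ≤ 5 * p := by omega
      obtain ⟨hlo, hhi, h0, h4⟩ := digit_bounds p r hp hr1 hr5'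
      set d : Int := PySem.Int.floordiv (r - 1) p with hddef
      have hfw : find_where n r = some d := find_where_eq n r h2 hr1 hr5'
      have hn1 : ¬ n = 1 := by omega
      have hn1' : ¬ n ≤ 1 := by omega
      rw [altLoop, position_right]
      simp only [hn1, hn1', if_false, hfw, ← hpdef, ← hddef]
      have hP5 : pyPow 5 (n - 1) = p := rfl
      have hP4 : pyPow 4 (n - 1) = (4:Int) ^ (n - 1).toNat := rfl
      have hpre' : ∀ d' : Int, d' * p ≤ r - 1 → r - 1 < (d' + 1) * p →
          Pre_position_right (n - 1) (r - d' * p) := by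
        intro d' hl hh
        have hexp : (d' + 1) * p = d' * p + p := by ring
        unfold Pre_position_right
        rcases (by omega : n - 1 = 1 ∨ 2 ≤ n - 1) with h | h
        · left; exact h
        · right; exact ⟨h, by omega, by omega⟩
      have hk' : (n - 1).toNat ≤ k := by omega
      have hd5 : d = 0 ∨ d = 1 ∨ d = 2 ∨ d = 3 ∨ d = 4 := by omega
      rcases hd5 with h | h | h | h | h <;> rw [h] <;> rw [h] at hlo hhi <;>
        simp only [case_distinction, hP5, hP4] <;> norm_num
      · exact ih (n - 1) r total hk' (by simpa using hpre' 0 hlo hhi)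
      · rw [ih (n - 1) (r - p) _ hk' (by simpa using hpre' 1 hlo hhi)]
        ring
      · rw [ih (n - 1) (r - 3 * p) _ hk' (hpre' 3 hlo hhi)]
        ring
      · rw [ih (n - 1) (r - 4 * p) _ hk' (hpre' 4 hlo hhi)]
        ring

-- ===== VERDICT (by name: the statement is the Claim_ definition above) =====
theorem position_right_spec : Claim_equal_position_right := by
  intro n r _hdom hpre
  unfold Spec_position_right position_right_alt
  have h := altLoop_eq n.toNat n r 0 le_rfl hpre
  omega
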